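-- pv_equiv track=rewrite | github.com/KramPiotr/Music-Generation | utilities/part_utils.py | separate_parts
-- ===== SOURCE A (Python) =====
-- def separate_parts(notes, durations):
--     start_seq = []
--     starts = []
--     for i, (n, d) in enumerate(zip(notes, durations)):
--         if d == 0 and n[0] == -1:
--             if len(start_seq) > 0 and start_seq[-1][1] == i-1:
--                 start_seq[-1][1] += 1
--             else:
--                 start_seq.append([i, i])
--                 starts.append(i)
--
--     for seq in start_seq:
--         if seq[1] - seq[0] != 31:
--             raise Exception(f"invalid start sequence: {seq}")
--
--     part_by_note = [0]
--     for i in range(1, len(notes)):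
--         next = part_by_note[-1] + 1
--         if next < len(starts) and i == starts[next]:
--             part_by_note.append(next)
--         else:
--             part_by_note.append(next - 1)
--
--     return(starts, part_by_note)
-- ===== SOURCE B (Python) =====
-- import itertools
-- import bisect
--
--
-- def separate_parts(notes, durations):
--     marker = [i for i, (n, d) in enumerate(zip(notes, durations))
--               if d == 0 and n[0] == -1]
--     starts = []
--     for _, grp in itertools.groupby(enumerate(marker), key=lambda t: t[1] - t[0]):
--         run = [i for _, i in grp]
--         if run[-1] - run[0] != 31:
--             raise Exception(f"invalid start sequence: [{run[0]}, {run[-1]}]")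
--         starts.append(run[0])
--     part_by_note = [0] + [max(0, bisect.bisect_right(starts, i) - 1)
--                           for i in range(1, len(notes))]
--     return (starts, part_by_note)
-- ===== Notes on version B (the rewrite author's own statement) =====
-- stated objective: idiomatic
-- what changed: Marker indices are collected by a comprehension and grouped into runs with itertools.groupby, and the stateful part-counter sweep is replaced by an independent bisect.bisect_right lookup per note index (clamped with max(0,..-1)).
import Mathlib
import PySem

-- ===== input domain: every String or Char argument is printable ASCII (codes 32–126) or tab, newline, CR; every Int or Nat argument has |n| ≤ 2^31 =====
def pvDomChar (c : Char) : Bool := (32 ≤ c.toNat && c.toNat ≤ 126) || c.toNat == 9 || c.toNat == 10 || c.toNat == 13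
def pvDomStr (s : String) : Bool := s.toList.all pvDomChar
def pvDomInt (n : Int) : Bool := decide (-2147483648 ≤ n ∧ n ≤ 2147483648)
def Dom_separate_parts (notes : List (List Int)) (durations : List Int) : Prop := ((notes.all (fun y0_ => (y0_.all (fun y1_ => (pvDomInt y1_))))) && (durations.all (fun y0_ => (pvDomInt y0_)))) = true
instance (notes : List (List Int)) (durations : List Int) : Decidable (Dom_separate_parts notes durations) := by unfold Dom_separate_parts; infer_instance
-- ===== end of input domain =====

-- B rewrites A: marker indices are grouped into runs (itertools.groupby style) and the
-- stateful part-counter sweep of phase 3 becomes an independent bisect_right lookup per index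
-- (objective: idiomatic; both validation loops only raise, which Pre_ excludes).

-- ===== PORT A =====
-- the marker test 'd == 0 and n[0] == -1' (n[0] raises on empty n; Pre_ excludes d = 0 with empty n)
def sp_isMarker (q : Int × (List Int × Int)) : Bool :=
  q.2.2 == 0 && (PySem.List.pyGet? q.2.1 0).getD 0 == -1

-- body of A's phase-1 loop on a marker index i: extend the last run or open a new one
def sp_mark (st : List (Int × Int) × List Int) (i : Int) : List (Int × Int) × List Int :=
  match st.1.getLast? with
  | some (s, e) =>
      if e == i - 1 then (st.1.dropLast ++ [(s, e + 1)], st.2)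
      else (st.1 ++ [(i, i)], st.2 ++ [i])
  | none => (st.1 ++ [(i, i)], st.2 ++ [i])

def sp_stepA1 (st : List (Int × Int) × List Int) (q : Int × (List Int × Int)) :
    List (Int × Int) × List Int :=
  if sp_isMarker q then sp_mark st q.1 else st

-- body of A's phase-3 loop: 'next = part_by_note[-1] + 1; …'
def sp_stepA3 (starts : List Int) (pb : List Int) (i : Int) : List Int :=
  let next := (PySem.List.pyGet? pb (-1)).getD 0 + 1
  if next < (starts.length : Int) && PySem.List.pyGetD starts next 0 == i then pb ++ [next]
  else pb ++ [next - 1]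

def separate_parts (notes : List (List Int)) (durations : List Int) : List Int × List Int :=
  let p1 := (PySem.List.enumerate (List.zip notes durations)).foldl sp_stepA1 ([], [])
  -- A's second loop only validates (raises on a run not spanning 31); Pre_ excludes raising inputs
  let starts := p1.2
  (starts, (PySem.List.pyRange 1 (notes.length : Int) 1).foldl (sp_stepA3 starts) [0])

-- ===== PORT B =====
-- marker = [i for i, (n, d) in enumerate(zip(notes, durations)) if d == 0 and n[0] == -1]
def sp_marker (notes : List (List Int)) (durations : List Int) : List Int :=
  ((PySem.List.enumerate (List.zip notes durations)).filter sp_isMarker).map (fun q => q.1)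

-- itertools.groupby(enumerate(marker), key=i-idx): group consecutive runs as (first, last) pairs
def sp_runsAux : Int → Int → List Int → List (Int × Int)
  | s, e, [] => [(s, e)]
  | s, e, x :: xs => if x == e + 1 then sp_runsAux s x xs else (s, e) :: sp_runsAux x x xs

def sp_runs : List Int → List (Int × Int)
  | [] => []
  | x :: xs => sp_runsAux x x xs

-- max(0, bisect.bisect_right(starts, i) - 1)
def sp_part (starts : List Int) (i : Int) : Int :=
  max 0 ((PySem.List.bisectRight starts i : Int) - 1)

def separate_parts_alt (notes : List (List Int)) (durations : List Int) : List Int × List Int :=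
  let starts := (sp_runs (sp_marker notes durations)).map Prod.fst
  -- B's run-length validation only raises (on a run not spanning 31); Pre_ excludes raising inputs
  (starts, 0 :: (PySem.List.pyRange 1 (notes.length : Int) 1).map (sp_part starts))

-- ===== PRECONDITION & SPEC =====
-- marker test on position i, via total lookups (out of range / empty note defaults to non-marker)
def sp_isM (notes : List (List Int)) (durations : List Int) (i : Nat) : Bool :=
  decide (i < min notes.length durations.length) && durations.getD i 1 == 0 &&
    (notes.getD i []).getD 0 0 == -1

-- Pre_ excludes exactly the inputs where A raises: an IndexError (duration 0 with an empty note
-- list) or the explicit Exception (a maximal run of consecutive marker indices whose length ≠ 32).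
def Pre_separate_parts (notes : List (List Int)) (durations : List Int) : Prop :=
  (∀ i < min notes.length durations.length,
      ¬ (durations.getD i 1 = 0 ∧ notes.getD i [] = ([] : List Int))) ∧
  (∀ i < min notes.length durations.length,
      sp_isM notes durations i = true → (i = 0 ∨ sp_isM notes durations (i - 1) = false) →
      ((∀ j < 32, sp_isM notes durations (i + j) = true) ∧
        sp_isM notes durations (i + 32) = false))
instance (notes : List (List Int)) (durations : List Int) : Decidable (Pre_separate_parts notes durations) := by unfold Pre_separate_parts; infer_instance

def pvWitness_separate_parts : List (List Int) × List Int := ([[60], [62, 64]], [2, 1])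

def Spec_separate_parts (notes : List (List Int)) (durations : List Int) (out : List Int × List Int) : Prop := out = separate_parts_alt notes durations
instance (notes : List (List Int)) (durations : List Int) (out : List Int × List Int) : Decidable (Spec_separate_parts notes durations out) := by unfold Spec_separate_parts; infer_instance

-- ===== CLAIM (what is proved, stated in full; the proofs are below) =====
def Claim_equal_separate_parts : Prop := ∀ (notes : List (List Int)) (durations : List Int), Dom_separate_parts notes durations → Pre_separate_parts notes durations → Spec_separate_parts notes durations (separate_parts notes durations)

-- ===== LEMMAS AND PROOFS =====

lemma sp_runsAux_map_fst (m : List Int) : ∀ s e,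
    (sp_runsAux s e m).map Prod.fst = s :: ((sp_runsAux s e m).map Prod.fst).tail := by
  induction m with
  | nil => intro s e; rfl
  | cons x xs ih =>
    intro s e
    simp only [sp_runsAux]
    split
    · exact ih s x
    · simp

lemma sp_foldl_mark (m : List Int) : ∀ (P : List (Int × Int)) (s e : Int) (sts : List Int),
    m.foldl sp_mark (P ++ [(s, e)], sts)
      = (P ++ sp_runsAux s e m, sts ++ ((sp_runsAux s e m).map Prod.fst).tail) := by
  induction m with
  | nil => intro P s e sts; simp [sp_runsAux]
  | cons x xs ih =>
    intro P s e sts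
    have hlast : (P ++ [(s, e)]).getLast? = some (s, e) := by simp
    simp only [List.foldl_cons]
    by_cases h : x = e + 1
    · have hm : sp_mark (P ++ [(s, e)], sts) x = (P ++ [(s, x)], sts) := by
        subst h; simp [sp_mark, hlast]
      rw [hm, ih P s x sts]
      simp only [sp_runsAux, show (x == e + 1) = true by simp [h]]
      simp
    · have hm : sp_mark (P ++ [(s, e)], sts) x = ((P ++ [(s, e)]) ++ [(x, x)], sts ++ [x]) := by
        simp only [sp_mark, hlast]
        rw [if_neg (by simp; omega)]
      rw [hm, ih (P ++ [(s, e)]) x x (sts ++ [x])]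
      simp only [sp_runsAux, show (x == e + 1) = false by simp [h], Bool.false_eq_true,
        if_false, List.map_cons, List.tail_cons, List.append_assoc, List.singleton_append]
      rw [← sp_runsAux_map_fst xs x x]

lemma sp_foldl_mark_nil (m : List Int) :
    m.foldl sp_mark (([] : List (Int × Int)), ([] : List Int))
      = (sp_runs m, (sp_runs m).map Prod.fst) := by
  cases m with
  | nil => rfl
  | cons x xs =>
    have hm : sp_mark (([] : List (Int × Int)), ([] : List Int)) x
        = (([] : List (Int × Int)) ++ [(x, x)], [x]) := by simp [sp_mark]
    simp only [List.foldl_cons, hm]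
    rw [sp_foldl_mark xs [] x x [x]]
    simp only [sp_runs, List.nil_append]
    refine Prod.ext rfl ?_
    rw [sp_runsAux_map_fst xs x x]
    simp

lemma sp_foldl_stepA1 (L : List (Int × (List Int × Int))) : ∀ st,
    L.foldl sp_stepA1 st = ((L.filter sp_isMarker).map (fun q => q.1)).foldl sp_mark st := by
  induction L with
  | nil => intro st; rfl
  | cons q L ih =>
    intro st
    by_cases h : sp_isMarker q
    · simp [h, sp_stepA1, ih]
    · simp [h, sp_stepA1, ih]

lemma sp_phase1 (notes : List (List Int)) (durations : List Int) :
    (PySem.List.enumerate (List.zip notes durations)).foldl sp_stepA1 ([], [])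
      = (sp_runs (sp_marker notes durations),
         (sp_runs (sp_marker notes durations)).map Prod.fst) := by
  rw [sp_foldl_stepA1, sp_foldl_mark_nil]; rfl

lemma sp_runsAux_tail_sublist (m : List Int) : ∀ s e,
    List.Sublist (((sp_runsAux s e m).map Prod.fst).tail) m := by
  induction m with
  | nil => intro s e; simp [sp_runsAux]
  | cons x xs ih =>
    intro s e
    simp only [sp_runsAux]
    split
    · exact (ih s x).cons x
    · simp only [List.map_cons, List.tail_cons]
      rw [sp_runsAux_map_fst xs x x]
      exact (ih x x).cons₂ x

lemma sp_starts_sublist (m : List Int) : List.Sublist ((sp_runs m).map Prod.fst) m := by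
  cases m with
  | nil => simp [sp_runs]
  | cons x xs =>
    simp only [sp_runs]
    rw [sp_runsAux_map_fst xs x x]
    exact (sp_runsAux_tail_sublist xs x x).cons₂ x

lemma sp_marker_pairwise (notes : List (List Int)) (durations : List Int) :
    (sp_marker notes durations).Pairwise (· < ·) := by
  unfold sp_marker
  rw [List.pairwise_map]
  exact List.Pairwise.sublist List.filter_sublist
    (PySem.List.pairwise_lt_enumerate (List.zip notes durations) 0)

lemma sp_marker_nonneg (notes : List (List Int)) (durations : List Int) :
    ∀ x ∈ sp_marker notes durations, 0 ≤ x := by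
  intro x hx
  simp only [sp_marker, List.mem_map, List.mem_filter] at hx
  obtain ⟨q, ⟨hq, _⟩, rfl⟩ := hx
  rw [PySem.List.mem_enumerate_iff] at hq
  obtain ⟨k, hk, rfl⟩ := hq
  simp

lemma sp_part_nonpos (starts : List Int) (hp : starts.Pairwise (· < ·))
    (hnn : ∀ x ∈ starts, 0 ≤ x) (j : Int) (hj : j ≤ 0) : sp_part starts j = 0 := by
  have hle : starts.Pairwise (· ≤ ·) := hp.imp (fun h => le_of_lt h)
  obtain ⟨ha, hb, hc⟩ := PySem.List.bisectRight_spec starts j hle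
  have h2 : PySem.List.bisectRight starts j ≤ 1 := by
    by_contra h
    push_neg at h
    have h1len : 1 < starts.length := lt_of_lt_of_le h ha
    have h0len : 0 < starts.length := by omega
    have e1 := hb 0 h0len (by omega)
    have e2 := hb 1 h1len (by omega)
    have p01 := List.pairwise_iff_getElem.mp hp 0 1 h0len h1len (by omega)
    have n0 := hnn _ (starts.getElem_mem h0len)
    have n1 := hnn _ (starts.getElem_mem h1len)
    omega
  unfold sp_part
  omega

lemma sp_part_step (starts : List Int) (hp : starts.Pairwise (· < ·)) (i : Int) :
    (if (sp_part starts (i - 1) + 1 < (starts.length : Int)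
         && PySem.List.pyGetD starts (sp_part starts (i - 1) + 1) 0 == i)
     then sp_part starts (i - 1) + 1
     else sp_part starts (i - 1) + 1 - 1) = sp_part starts i := by
  have hle : starts.Pairwise (· ≤ ·) := hp.imp (fun h => le_of_lt h)
  obtain ⟨h1a, h1b, h1c⟩ := PySem.List.bisectRight_spec starts (i - 1) hle
  obtain ⟨h2a, h2b, h2c⟩ := PySem.List.bisectRight_spec starts i hle
  set c1 := PySem.List.bisectRight starts (i - 1) with hc1
  set c2 := PySem.List.bisectRight starts i with hc2
  have hmono : c1 ≤ c2 := by
    by_contra h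
    push_neg at h
    have hlen : c2 < starts.length := lt_of_lt_of_le h h1a
    have e1 := h1b c2 hlen h
    have e2 := h2c c2 hlen (le_refl _)
    omega
  have hstep : c2 ≤ c1 + 1 := by
    by_contra h
    push_neg at h
    have h1len : c1 + 1 < starts.length := lt_of_lt_of_le h h2a
    have h0len : c1 < starts.length := by omega
    have e1 := h2b c1 h0len (by omega)
    have e2 := h2b (c1 + 1) h1len (by omega)
    have e3 := h1c c1 h0len (le_refl _)
    have p01 := List.pairwise_iff_getElem.mp hp c1 (c1 + 1) h0len h1len (by omega)
    omega
  have hget : ∀ (k : Nat) (hk : k < starts.length),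
      PySem.List.pyGetD starts (k : Int) 0 = starts[k] := by
    intro k hk
    rw [PySem.List.pyGetD_natCast, List.getD_eq_getElem _ _ hk]
  by_cases h0 : c1 = 0
  · have hprev : sp_part starts (i - 1) = 0 := by unfold sp_part; omega
    have hc2le : c2 ≤ 1 := by omega
    have hrhs : sp_part starts i = 0 := by unfold sp_part; omega
    have hnc : ¬((decide ((0 : Int) + 1 < (starts.length : Int))
        && (PySem.List.pyGetD starts ((0 : Int) + 1) 0 == i)) = true) := by
      intro hcond
      simp only [Bool.and_eq_true, decide_eq_true_eq, beq_iff_eq] at hcond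
      obtain ⟨hl, he⟩ := hcond
      have hl1 : 1 < starts.length := by omega
      rw [show ((0 : Int) + 1) = ((1 : Nat) : Int) by norm_num, hget 1 hl1] at he
      have := h2c 1 hl1 hc2le
      omega
    rw [hprev, hrhs, if_neg hnc]
    norm_num
  · have h1le : 1 ≤ c1 := by omega
    have hprev : sp_part starts (i - 1) = (c1 : Int) - 1 := by unfold sp_part; omega
    have hidx : (c1 : Int) - 1 + 1 = (c1 : Int) := by ring
    rw [hprev, hidx]
    rcases (by omega : c2 = c1 ∨ c2 = c1 + 1) with hcc | hcc
    · -- no new start at i: A appends next - 1 = c1 - 1 = sp_part starts i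
      have hrhs : sp_part starts i = (c1 : Int) - 1 := by unfold sp_part; omega
      have hnc : ¬((decide ((c1 : Int) < (starts.length : Int))
          && (PySem.List.pyGetD starts ((c1 : Nat) : Int) 0 == i)) = true) := by
        intro hcond
        simp only [Bool.and_eq_true, decide_eq_true_eq, beq_iff_eq] at hcond
        obtain ⟨hl, he⟩ := hcond
        have hl1 : c1 < starts.length := by omega
        rw [hget c1 hl1] at he
        have := h2c c1 hl1 (by omega)
        omega
      rw [hrhs, if_neg hnc]
    · -- a new start at i: starts[c1] = i and A appends next = c1
      have h0len : c1 < starts.length := by omega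
      have e1 := h2b c1 h0len (by omega)
      have e2 := h1c c1 h0len (le_refl _)
      have heq : starts[c1] = i := by omega
      have hrhs : sp_part starts i = (c1 : Int) := by unfold sp_part; omega
      have hc : ((decide ((c1 : Int) < (starts.length : Int))
          && (PySem.List.pyGetD starts ((c1 : Nat) : Int) 0 == i)) = true) := by
        simp only [Bool.and_eq_true, decide_eq_true_eq, beq_iff_eq]
        exact ⟨by exact_mod_cast h0len, by rw [hget c1 h0len, heq]⟩
      rw [hrhs, if_pos hc]

lemma sp_phase3 (starts : List Int) (hp : starts.Pairwise (· < ·))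
    (hnn : ∀ x ∈ starts, 0 ≤ x) : ∀ n : Nat,
    (PySem.List.pyRange 1 (n : Int) 1).foldl (sp_stepA3 starts) [0]
      = 0 :: (PySem.List.pyRange 1 (n : Int) 1).map (sp_part starts)
    ∧ (0 :: (PySem.List.pyRange 1 (n : Int) 1).map (sp_part starts)).getLast?
      = some (sp_part starts ((n : Int) - 1)) := by
  intro n
  induction n with
  | zero =>
    rw [PySem.List.pyRange_one_eq_nil (by norm_num)]
    simp [sp_part_nonpos starts hp hnn (-1) (by norm_num)]
  | succ n ih =>
    by_cases hn : n = 0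
    · subst hn
      rw [show (((0 : Nat) + 1 : Nat) : Int) = (1 : Int) by norm_num,
          PySem.List.pyRange_one_eq_nil (le_refl 1)]
      simp [sp_part_nonpos starts hp hnn 0 (le_refl 0)]
    · obtain ⟨ihf, ihl⟩ := ih
      have hcast : ((n + 1 : Nat) : Int) = (n : Int) + 1 := by push_cast; ring
      rw [hcast, PySem.List.pyRange_one_succ_right (by omega : (1 : Int) ≤ (n : Int))]
      rw [List.foldl_append, List.map_append, ihf]
      have hlast : sp_stepA3 starts (0 :: (PySem.List.pyRange 1 (n : Int) 1).map (sp_part starts)) (n : Int)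
          = (0 :: (PySem.List.pyRange 1 (n : Int) 1).map (sp_part starts)) ++ [sp_part starts (n : Int)] := by
        unfold sp_stepA3
        rw [PySem.List.pyGet?_neg_one, ihl]
        simp only [Option.getD_some]
        split
        · next hcond =>
            rw [← sp_part_step starts hp (n : Int)]
            simp only [Bool.and_eq_true, decide_eq_true_eq, beq_iff_eq] at hcond
            simp [hcond.1, hcond.2]
        · next hcond =>
            rw [← sp_part_step starts hp (n : Int)]
            simp only [Bool.not_eq_true] at hcond
            have hcnot : ¬(sp_part starts ((n : Int) - 1) + 1 < (starts.length : Int) ∧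
                PySem.List.pyGetD starts (sp_part starts ((n : Int) - 1) + 1) 0 = (n : Int)) := by
              intro hc
              simp [hc.1, hc.2] at hcond
            simp [hcnot]
      constructor
      · simp only [List.foldl_cons, List.foldl_nil]
        rw [hlast]
        simp
      · rw [show ((n : Int) + 1 - 1) = (n : Int) by ring]
        simp only [List.map_cons, List.map_nil]
        rw [show (0 : Int) :: (List.map (sp_part starts) (PySem.List.pyRange 1 (n : Int) 1) ++ [sp_part starts (n : Int)])
              = ((0 : Int) :: List.map (sp_part starts) (PySem.List.pyRange 1 (n : Int) 1)) ++ [sp_part starts (n : Int)] from rfl,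
            List.getLast?_concat]

lemma sp_ports_eq (notes : List (List Int)) (durations : List Int) :
    separate_parts notes durations = separate_parts_alt notes durations := by
  unfold separate_parts separate_parts_alt
  rw [sp_phase1]
  dsimp only
  have hp : ((sp_runs (sp_marker notes durations)).map Prod.fst).Pairwise (· < ·) :=
    List.Pairwise.sublist (sp_starts_sublist _) (sp_marker_pairwise notes durations)
  have hnn : ∀ x ∈ (sp_runs (sp_marker notes durations)).map Prod.fst, 0 ≤ x :=
    fun x hx => sp_marker_nonneg notes durations x ((sp_starts_sublist _).subset hx)
  rw [(sp_phase3 _ hp hnn notes.length).1]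

-- ===== VERDICT (by name: the statement is the Claim_ definition above) =====
theorem separate_parts_spec : Claim_equal_separate_parts := by
  intro notes durations _ _
  exact sp_ports_eq notes durations
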